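-- pv_equiv track=rewrite | github.com/Nanu25/UBB-Computer-Science | Semester 1/Fundamentals of Programming/Scramble/service/service.py | shuffle_sentence_better
-- ===== SOURCE A (Python) =====
-- import copy
--
-- def shuffle_sentence_better(sentence):
--     new_sentence = copy.deepcopy(sentence)
--
--     new_sentence.strip()
--     new_sentence = new_sentence.split(' ')
--
--     better_sentence = ""
--     for sen in new_sentence:
--         propozitie = list(sen)
--
--         for i in range(1, len(propozitie) - 3):
--             propozitie[i], propozitie[i + 1] = propozitie[i + 1], propozitie[i]
--
--         new_sen = ""
--         for letter in propozitie:
--             new_sen += letter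
--
--         better_sentence += new_sen + " "
--
--     better_sentence = better_sentence[:-1]
--     return better_sentence
-- ===== SOURCE B (Python) =====
-- def shuffle_sentence_better(sentence):
--     words = sentence.split(' ')
--     out = []
--     for w in words:
--         n = len(w)
--         if n > 4:
--             w = w[0] + w[2:n-2] + w[1] + w[n-2:]
--         out.append(w)
--     return ' '.join(out)
-- ===== Notes on version B (the rewrite author's own statement) =====
-- stated objective: simpler
-- what changed: The adjacent-swap loop and char-by-char string rebuild are replaced by the closed-form observation that the swaps left-rotate word[1:len-2] by one, so each word longer than 4 is rebuilt directly with slices (w[0]+w[2:n-2]+w[1]+w[n-2:]) and the words are joined with a single str.join instead of append-then-trim.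
import Mathlib
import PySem

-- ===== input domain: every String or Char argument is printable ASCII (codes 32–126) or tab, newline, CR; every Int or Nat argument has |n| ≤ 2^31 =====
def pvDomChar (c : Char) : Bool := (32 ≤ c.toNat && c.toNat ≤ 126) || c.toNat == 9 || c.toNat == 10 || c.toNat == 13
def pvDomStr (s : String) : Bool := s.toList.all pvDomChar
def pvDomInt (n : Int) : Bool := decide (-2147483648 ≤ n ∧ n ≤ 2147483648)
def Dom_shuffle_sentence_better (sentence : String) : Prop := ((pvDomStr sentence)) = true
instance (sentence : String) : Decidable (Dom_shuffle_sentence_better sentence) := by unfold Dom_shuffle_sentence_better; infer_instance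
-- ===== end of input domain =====

-- B replaces A's adjacent-swap loop by the closed-form slice rebuild of each word (the swaps
-- left-rotate word[1:len-2] by one) and joins the words with ' '.join instead of append-then-trim.


-- ===== PORT A =====
-- Python's tuple swap 'l[i], l[i+1] = l[i+1], l[i]': both reads from the pre-swap list, then two writes.
-- A's loop keeps i and i+1 in range, so the total forms pyGetD/pySetD compute exactly Python's values there.
def pvSwapStep (l : List Char) (i : Int) : List Char :=
  PySem.List.pySetD (PySem.List.pySetD l i (PySem.List.pyGetD l (i + 1) ' ')) (i + 1)
    (PySem.List.pyGetD l i ' ')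

-- 'new_sentence = copy.deepcopy(sentence)' copies the string; 'new_sentence.strip()' discards its result (no effect).
def shuffle_sentence_better (sentence : String) : String :=
  let new_sentence := PySem.Chars.splitOn sentence.toList [' ']
  let better_sentence :=
    new_sentence.foldl (fun better_sentence sen =>
      let propozitie :=
        (PySem.List.pyRange 1 (PySem.List.len sen - 3) 1).foldl pvSwapStep sen
      let new_sen := propozitie.foldl (fun new_sen letter => new_sen ++ [letter]) ([] : List Char)
      better_sentence ++ new_sen ++ [' ']) ([] : List Char)
  String.ofList (PySem.List.slice better_sentence none (some (-1)))

-- ===== PORT B =====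
-- w[0] + w[2:n-2] + w[1] + w[n-2:] for n > 4, else w unchanged
def pvAltWord (w : List Char) : List Char :=
  let n := PySem.List.len w
  if n > 4 then
    [PySem.List.pyGetD w 0 ' '] ++ PySem.List.slice w (some 2) (some (n - 2)) ++
      [PySem.List.pyGetD w 1 ' '] ++ PySem.List.slice w (some (n - 2)) none
  else w

def shuffle_sentence_better_alt (sentence : String) : String :=
  let words := PySem.Chars.splitOn sentence.toList [' ']
  let out := words.foldl (fun out w => out ++ [pvAltWord w]) ([] : List (List Char))
  String.ofList (PySem.Chars.join [' '] out)

-- ===== PRECONDITION & SPEC =====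
def Spec_shuffle_sentence_better (sentence : String) (out : String) : Prop := out = shuffle_sentence_better_alt sentence
instance (sentence : String) (out : String) : Decidable (Spec_shuffle_sentence_better sentence out) := by unfold Spec_shuffle_sentence_better; infer_instance

-- ===== CLAIM (what is proved, stated in full; the proofs are below) =====
def Claim_equal_shuffle_sentence_better : Prop := ∀ (sentence : String), Dom_shuffle_sentence_better sentence → Spec_shuffle_sentence_better sentence (shuffle_sentence_better sentence)

-- ===== LEMMAS AND PROOFS =====

-- one swap at position k+1 on the invariant shape a :: take k ++ b :: drop k
theorem pvSwap_mid (a b : Char) (rest : List Char) (k : Nat) (hk : k < rest.length) :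
    pvSwapStep (a :: (rest.take k ++ b :: rest.drop k)) ((k : Int) + 1)
      = a :: (rest.take (k + 1) ++ b :: rest.drop (k + 1)) := by
  unfold pvSwapStep
  have h1 : ((k : Int) + 1) = ((k + 1 : Nat) : Int) := by push_cast; ring
  have h2 : (((k + 1 : Nat) : Int) + 1) = ((k + 2 : Nat) : Int) := by push_cast; ring
  rw [h1, h2, PySem.List.pyGetD_natCast, PySem.List.pyGetD_natCast,
      PySem.List.pySetD_natCast, PySem.List.pySetD_natCast]
  have hdrop : rest.drop k = rest[k] :: rest.drop (k + 1) := by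
    rw [List.drop_eq_getElem_cons hk]
  have htake : rest.take (k + 1) = rest.take k ++ [rest[k]] := by
    rw [List.take_add_one, List.getElem?_eq_getElem hk]; rfl
  rw [hdrop, htake]
  have hshape : a :: (rest.take k ++ b :: rest[k] :: rest.drop (k + 1))
      = (a :: rest.take k) ++ b :: rest[k] :: rest.drop (k + 1) := by simp
  have hpre : (a :: rest.take k).length = k + 1 := by
    simp [List.length_take, Nat.min_eq_left (le_of_lt hk)]
  rw [hshape]
  rw [List.getD_append_right _ _ _ (k + 2) (by omega), List.getD_append_right _ _ _ (k + 1) (by omega)]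
  rw [hpre]
  simp only [Nat.add_sub_cancel_left, Nat.succ_sub_succ]
  rw [Nat.sub_self]
  simp only [List.getD_cons_succ, List.getD_cons_zero]
  rw [List.set_append_right _ _ (by omega), hpre]
  simp only [Nat.sub_self, List.set_cons_zero]
  rw [List.set_append_right _ _ (by omega), hpre]
  have e2 : (k + 2) - (k + 1) = 1 := by omega
  rw [e2]
  simp only [List.set_cons_succ, List.set_cons_zero, List.cons_append, List.append_assoc,
    List.nil_append]

-- loop invariant: after the swaps i = 1 .. j, the word a :: b :: rest has become
-- a :: rest.take j ++ b :: rest.drop j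
theorem pvLoop_inv (a b : Char) (rest : List Char) (j : Nat) (hj : j + 1 ≤ rest.length) :
    (PySem.List.pyRange 1 ((j : Int) + 1) 1).foldl pvSwapStep (a :: b :: rest)
      = a :: (rest.take j ++ b :: rest.drop j) := by
  induction j with
  | zero =>
      rw [show ((0 : Nat) : Int) + 1 = 1 by norm_num, PySem.List.pyRange_one_eq_nil (by omega)]
      simp
  | succ j ih =>
      have hsplit : PySem.List.pyRange 1 (((j + 1 : Nat) : Int) + 1) 1
          = PySem.List.pyRange 1 ((j : Int) + 1) 1 ++ [(j : Int) + 1] := by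
        have : (((j + 1 : Nat) : Int) + 1) = ((j : Int) + 1) + 1 := by push_cast; ring
        rw [this, PySem.List.pyRange_one_succ_right (by omega)]
      rw [hsplit, List.foldl_append]
      rw [ih (by omega)]
      simp only [List.foldl_cons, List.foldl_nil]
      exact pvSwap_mid a b rest j (by omega)

-- per-word agreement: A's swap loop computes B's slice rebuild
theorem pvWord_eq (w : List Char) :
    (PySem.List.pyRange 1 (PySem.List.len w - 3) 1).foldl pvSwapStep w = pvAltWord w := by
  by_cases hle : w.length ≤ 4
  · rw [PySem.List.pyRange_one_eq_nil (by simp [PySem.List.len_eq]; omega)]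
    unfold pvAltWord
    rw [if_neg (by simp [PySem.List.len_eq]; omega)]
    rfl
  · replace hle := Nat.lt_of_not_le hle
    obtain ⟨a, b, rest, rfl⟩ : ∃ a b rest, w = a :: b :: rest := by
      match w, hle with
      | a :: b :: rest, _ => exact ⟨a, b, rest, rfl⟩
    have hr : 3 ≤ rest.length := by simp at hle; omega
    have hlen : PySem.List.len (a :: b :: rest) - 3 = ((rest.length - 2 : Nat) : Int) + 1 := by
      simp [PySem.List.len_eq]
      omega
    rw [hlen, pvLoop_inv a b rest (rest.length - 2) (by omega)]
    unfold pvAltWord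
    rw [if_pos (by simp [PySem.List.len_eq]; omega)]
    have hn2 : PySem.List.len (a :: b :: rest) - 2 = ((rest.length : Nat) : Int) := by
      simp [PySem.List.len_eq]; omega
    rw [hn2]
    rw [show (2 : Int) = ((2 : Nat) : Int) by norm_num, PySem.List.slice_natCast,
        PySem.List.slice_from_natCast]
    have hd2 : (a :: b :: rest).drop 2 = rest := rfl
    have hdn : (a :: b :: rest).drop rest.length = rest.drop (rest.length - 2) := by
      have : rest.length = (rest.length - 2) + 2 := by omega
      conv_lhs => rw [this]
      simp [List.drop_succ_cons]
    rw [hd2, hdn]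
    simp [PySem.List.pyGetD_zero_cons, List.append_assoc]
    simp [PySem.List.pyGetD, PySem.List.pyGet?, PySem.List.pyIdx?]

-- joining: the append-a-space fold followed by dropping the final char is ' '.join
theorem pvJoin_eq (f : List Char → List Char) : ∀ (ws : List (List Char)),
    (ws.flatMap (fun w => f w ++ [' '])).dropLast = PySem.Chars.join [' '] (ws.map f)
  | [] => rfl
  | [w] => by
      simp [PySem.Chars.join_singleton]
  | w :: w' :: t => by
      have hne : ((w' :: t).flatMap (fun w => f w ++ [' '])) ≠ [] := by
        simp
      rw [List.flatMap_cons, List.dropLast_append_of_ne_nil hne]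
      rw [List.map_cons, List.map_cons, PySem.Chars.join_cons_cons]
      rw [pvJoin_eq f (w' :: t)]
      simp

theorem pvMain_eq (sentence : String) :
    shuffle_sentence_better sentence = shuffle_sentence_better_alt sentence := by
  unfold shuffle_sentence_better shuffle_sentence_better_alt
  simp only [PySem.List.foldl_append_singleton, List.nil_append,
    PySem.List.foldl_append_singleton_eq_map, PySem.List.slice_to_neg_one]
  congr 1
  have hstep : ∀ (acc : List Char) (sen : List Char),
      acc ++ (PySem.List.pyRange 1 (PySem.List.len sen - 3) 1).foldl pvSwapStep sen ++ [' ']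
        = acc ++ (pvAltWord sen ++ [' ']) := by
    intro acc sen
    rw [pvWord_eq, List.append_assoc]
  have hfun : (fun (better_sentence : List Char) (sen : List Char) =>
      better_sentence ++ (PySem.List.pyRange 1 (PySem.List.len sen - 3) 1).foldl pvSwapStep sen ++ [' '])
      = (fun acc sen => acc ++ (pvAltWord sen ++ [' '])) := by
    funext acc sen; exact hstep acc sen
  rw [hfun, PySem.List.foldl_append_eq_flatMap, List.nil_append, pvJoin_eq]

-- ===== VERDICT (by name: the statement is the Claim_ definition above) =====
theorem shuffle_sentence_better_spec : Claim_equal_shuffle_sentence_better := by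
  intro sentence _
  unfold Spec_shuffle_sentence_better
  exact pvMain_eq sentence
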